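-- pv_equiv track=rewrite | github.com/asukhodko/dify-markdown-chunker | markdown_chunker/parser/fence_handler.py | get_fence_indent
-- ===== SOURCE A (Python) =====
-- def get_fence_indent(line: str) -> int:
--     """Get the indentation level of a line."""
--     indent = 0
--     for char in line:
--         if char == " ":
--             indent += 1
--         elif char == "\t":
--             indent += 4
--         else:
--             break
--     return indent
-- ===== SOURCE B (Python) =====
-- def get_fence_indent(line: str) -> int:
--     """Get the indentation level of a line."""
--     prefix = line[:len(line) - len(line.lstrip(" \t"))]
--     return prefix.count(" ") + 4 * prefix.count("\t")
-- ===== Notes on version B (the rewrite author's own statement) =====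
-- stated objective: idiomatic
-- what changed: Replaced the char-by-char break-loop accumulator with a find-prefix-then-count decomposition: slice off the leading space/tab prefix via lstrip(' \t') and compute the indent as prefix.count(' ') + 4*prefix.count('\t').
import Mathlib
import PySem

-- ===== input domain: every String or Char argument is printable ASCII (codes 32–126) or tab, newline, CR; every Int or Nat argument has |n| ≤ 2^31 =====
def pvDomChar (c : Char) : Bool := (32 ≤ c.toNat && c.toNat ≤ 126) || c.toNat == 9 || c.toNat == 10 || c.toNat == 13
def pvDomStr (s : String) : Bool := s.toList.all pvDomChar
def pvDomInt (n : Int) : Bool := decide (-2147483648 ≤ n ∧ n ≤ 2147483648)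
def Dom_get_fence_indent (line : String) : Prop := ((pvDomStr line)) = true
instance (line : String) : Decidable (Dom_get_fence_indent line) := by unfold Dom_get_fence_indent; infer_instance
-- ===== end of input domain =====

-- B replaces A's char-by-char break-loop with an idiomatic prefix-slice (lstrip " \t") and per-char counts.


-- ===== PORT A =====
-- the for-loop with break, as an accumulator recursion over the characters
def get_fence_indent_loop (acc : Int) : List Char → Int
  | [] => acc
  | c :: cs =>
    if c = ' ' then get_fence_indent_loop (acc + 1) cs
    else if c = '\t' then get_fence_indent_loop (acc + 4) cs
    else acc

def get_fence_indent (line : String) : Int :=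
  get_fence_indent_loop 0 line.toList

-- ===== PORT B =====
-- prefix = line[:len(line) - len(line.lstrip(" \t"))]; return prefix.count(" ") + 4 * prefix.count("\t")
def get_fence_indent_alt (line : String) : Int :=
  let l := line.toList
  let stripped := l.dropWhile (fun c => c = ' ' ∨ c = '\t')   -- lstrip(" \t")
  let prefix_ := l.take (l.length - stripped.length)          -- the slice line[:…]
  (prefix_.count ' ' : Int) + 4 * (prefix_.count '\t' : Int)

-- ===== PRECONDITION & SPEC =====
def Spec_get_fence_indent (line : String) (out : Int) : Prop := out = get_fence_indent_alt line
instance (line : String) (out : Int) : Decidable (Spec_get_fence_indent line out) := by unfold Spec_get_fence_indent; infer_instance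

-- ===== CLAIM (what is proved, stated in full; the proofs are below) =====
def Claim_equal_get_fence_indent : Prop := ∀ (line : String), Dom_get_fence_indent line → Spec_get_fence_indent line (get_fence_indent line)

-- ===== LEMMAS AND PROOFS =====

theorem prefix_eq_takeWhile (p : Char → Bool) (l : List Char) :
    l.take (l.length - (l.dropWhile p).length) = l.takeWhile p := by
  have h : l.length - (l.dropWhile p).length = (l.takeWhile p).length := by
    have := congrArg List.length (List.takeWhile_append_dropWhile (p := p) (l := l))
    simp only [List.length_append] at this
    omega
  rw [h]
  exact (List.prefix_iff_eq_take.mp (List.takeWhile_prefix p)).symm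

theorem loop_eq_counts (l : List Char) (acc : Int) :
    get_fence_indent_loop acc l =
      acc + ((l.takeWhile (fun c => decide (c = ' ' ∨ c = '\t'))).count ' ' : Int)
          + 4 * ((l.takeWhile (fun c => decide (c = ' ' ∨ c = '\t'))).count '\t' : Int) := by
  induction l generalizing acc with
  | nil => simp [get_fence_indent_loop]
  | cons c cs ih =>
    by_cases hs : c = ' '
    · subst hs
      simp only [get_fence_indent_loop, List.takeWhile_cons]

      norm_num [List.count_cons, ih]
      ring
    · by_cases ht : c = '\t'
      · subst ht
        rw [show get_fence_indent_loop acc ('\t' :: cs) = get_fence_indent_loop (acc + 4) cs from by simp [get_fence_indent_loop]]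
        simp only [List.takeWhile_cons]
        norm_num [List.count_cons, ih]
        ring
      · simp [get_fence_indent_loop, hs, ht]

-- ===== VERDICT (by name: the statement is the Claim_ definition above) =====
theorem get_fence_indent_spec : Claim_equal_get_fence_indent := by
  intro line _
  unfold Spec_get_fence_indent get_fence_indent get_fence_indent_alt
  simp only [prefix_eq_takeWhile]
  rw [loop_eq_counts]
  ring
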